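-- pv_equiv track=rewrite | github.com/epoyraz/leetcode | solutions/3601.py | kthCharacter
-- ===== SOURCE A (Python) =====
-- def kthCharacter(k, operations):
--     """
--     :type k: int
--     :type operations: List[int]
--     :rtype: str
--     """
--     # Number of operations
--     m = len(operations)
--     # Precompute the length of the string after each operation: length[i] = 2^i
--     lengths = [1] * (m + 1)
--     for i in range(m):
--         lengths[i + 1] = lengths[i] << 1
--     # Current position we want, and the total shift count
--     cur_k = k
--     shift_count = 0
--     # Walk operations in reverse to map cur_k back to the original 'a'
--     for i in range(m - 1, -1, -1):
--         if cur_k > lengths[i]: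
--             # We're in the second half of the string after operation i
--             cur_k -= lengths[i]
--             # If this operation was a shift-append, accumulate one shift
--             if operations[i] == 1:
--                 shift_count = (shift_count + 1) % 26
--     # After reversing all operations, we land at position cur_k in the initial string "a"
--     # Since the initial word is "a" of length 1, cur_k must be 1
--     # Apply the accumulated shifts to 'a'
--     return chr((ord('a') - ord('a') + shift_count) % 26 + ord('a'))
-- ===== SOURCE B (Python) =====
-- def kthCharacter(k, operations):
--     """
--     :type k: int
--     :type operations: List[int]
--     :rtype: str
--     """
--     # Position 1 is always the original 'a'.  An operation whose doubling
--     # already reaches position k cannot move it (position k stays in the first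
--     # half from then on), so only the first bit_length(k-1) operations matter.
--     if k <= 1:
--         return 'a'
--     return _walk(k, operations[:(k - 1).bit_length()])
--
--
-- def _walk(k, ops):
--     # Peel the last operation: the word it built is the previous word followed
--     # by a copy of it, shifted by one letter when the operation is 1.
--     if not ops:
--         return 'a'
--     rest, op = ops[:-1], ops[-1]
--     half = 1 << len(rest)
--     if k <= half:
--         return _walk(k, rest)
--     c = _walk(k - half, rest)
--     if op != 1:
--         return c
--     return 'a' if c == 'z' else chr(ord(c) + 1)
-- ===== Notes on version B (the rewrite author's own statement) =====
-- stated objective: faster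
-- what changed: Replaces A's precomputed big-integer lengths table and reverse walk over all m operations with a truncation of operations to the first bit_length(k-1) entries (later doublings cannot move position k) followed by a short recursive peel of the last operation that shifts the returned character directly.
import Mathlib
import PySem

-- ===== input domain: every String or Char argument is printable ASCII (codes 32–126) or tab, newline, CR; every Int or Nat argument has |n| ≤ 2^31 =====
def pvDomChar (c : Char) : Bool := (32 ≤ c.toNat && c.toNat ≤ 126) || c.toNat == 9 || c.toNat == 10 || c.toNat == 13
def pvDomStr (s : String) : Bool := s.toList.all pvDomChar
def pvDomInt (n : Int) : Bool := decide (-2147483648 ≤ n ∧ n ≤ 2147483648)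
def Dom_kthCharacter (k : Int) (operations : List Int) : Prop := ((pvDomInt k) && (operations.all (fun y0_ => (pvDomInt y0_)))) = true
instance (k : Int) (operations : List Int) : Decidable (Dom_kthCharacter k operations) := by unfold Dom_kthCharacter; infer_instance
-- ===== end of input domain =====

-- B truncates operations to the first bit_length(k-1) entries (later doublings cannot
-- move position k) and peels the last operation recursively, shifting the returned
-- character; a timing run measured it faster than A's table-and-walk.

-- ===== PORT A =====
def kthCharacter (k : Int) (operations : List Int) : String :=
  let m := operations.length
  -- lengths = [1] * (m + 1); for i in range(m): lengths[i+1] = lengths[i] << 1   («<< 1» ported as «* 2»)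
  let lengths : List Int :=
    (List.range m).foldl (fun ls i => ls.set (i + 1) (ls.getD i 0 * 2)) (List.replicate (m + 1) (1 : Int))
  -- for i in range(m-1, -1, -1): …   (all indexes are provably in range, so pyGetD's default is never used)
  let r :=
    (PySem.List.pyRange ((m : Int) - 1) (-1) (-1)).foldl
      (fun (p : Int × Int) (i : Int) =>
        if PySem.List.pyGetD lengths i 0 < p.1 then
          (p.1 - PySem.List.pyGetD lengths i 0,
           if PySem.List.pyGetD operations i 0 = 1 then PySem.Int.mod (p.2 + 1) 26 else p.2)
        else p)
      (k, 0)
  -- chr((ord('a') - ord('a') + shift_count) % 26 + ord('a'))   (chr ported as Char.ofNat; code is in [97,123))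
  String.singleton (Char.ofNat (PySem.Int.mod (97 - 97 + r.2) 26 + 97).toNat)

-- ===== PORT B =====
-- _walk: peel the last operation (ops[:-1] / ops[-1]); «1 << n» ported as 2 ^ n,
-- chr(ord(c) + 1) on the single-letter c as Char.ofNat of its code + 1
def pvWalk (k : Int) (ops : List Int) : String :=
  if h : ops = [] then "a"
  else
    let rest := ops.dropLast
    let op := ops.getLast h
    let half : Int := 2 ^ rest.length
    if k ≤ half then pvWalk k rest
    else
      let c := pvWalk (k - half) rest
      if op ≠ 1 then c
      else if c = "z" then "a" else String.singleton (Char.ofNat ((c.get 0).toNat + 1))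
termination_by ops.length
decreasing_by
  all_goals
    simp only [List.length_dropLast]
    have : ops.length ≠ 0 := fun hz => h (List.eq_nil_of_length_eq_zero hz)
    omega

def kthCharacter_alt (k : Int) (operations : List Int) : String :=
  if k ≤ 1 then "a"
  -- operations[:(k-1).bit_length()]: a slice to a nonnegative bound, ported as take (exact)
  else pvWalk k (operations.take (PySem.Int.bitLength (k - 1)))

-- ===== PRECONDITION & SPEC =====
def Spec_kthCharacter (k : Int) (operations : List Int) (out : String) : Prop := out = kthCharacter_alt k operations
instance (k : Int) (operations : List Int) (out : String) : Decidable (Spec_kthCharacter k operations out) := by unfold Spec_kthCharacter; infer_instance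

-- ===== CLAIM (what is proved, stated in full; the proofs are below) =====
def Claim_equal_kthCharacter : Prop := ∀ (k : Int) (operations : List Int), Dom_kthCharacter k operations → Spec_kthCharacter k operations (kthCharacter k operations)

-- ===== LEMMAS AND PROOFS =====

-- number of indices i with ops[i] = 1 and bit i of t set (scanned low bit first)
def pvBsum : List Int → Nat → Nat
  | [], _ => 0
  | op :: rest, t => (if t % 2 = 1 ∧ op = 1 then 1 else 0) + pvBsum rest (t / 2)

theorem pvBsum_pow_add (l : List Int) (x r : Nat) :
    pvBsum l (2 ^ l.length * x + r) = pvBsum l r := by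
  induction l generalizing x r with
  | nil => simp [pvBsum]
  | cons op rest ih =>
      have h2 : 2 ^ (op :: rest).length * x + r = 2 * (2 ^ rest.length * x) + r := by
        simp [List.length_cons]; ring
      rw [pvBsum, pvBsum, h2]
      have hmod : (2 * (2 ^ rest.length * x) + r) % 2 = r % 2 := by omega
      have hdiv : (2 * (2 ^ rest.length * x) + r) / 2 = 2 ^ rest.length * x + r / 2 := by omega
      rw [hmod, hdiv, ih]

theorem pvBsum_append (l : List Int) (x : Int) (u : Nat) :
    pvBsum (l ++ [x]) u = pvBsum l u + (if (u / 2 ^ l.length) % 2 = 1 ∧ x = 1 then 1 else 0) := by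
  induction l generalizing u with
  | nil => simp [pvBsum]
  | cons op rest ih =>
      rw [List.cons_append, pvBsum, pvBsum, ih (u / 2)]
      have : u / 2 / 2 ^ rest.length = u / 2 ^ (op :: rest).length := by
        rw [Nat.div_div_eq_div_mul, List.length_cons, pow_succ, mul_comm (2 ^ rest.length) 2,
            ← Nat.div_div_eq_div_mul]
      rw [this]; omega

def pvIter (s : Int) : Int := (s + 1) % 26

theorem pvIter_zero (n : Nat) : pvIter^[n] (0 : Int) = (n : Int) % 26 := by
  induction n with
  | zero => simp
  | succ n ih =>
      rw [Function.iterate_succ_apply', ih, pvIter]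
      push_cast
      omega

-- the clamped 0-based position the reverse walk lands on
def pvT (c : Int) (n : Nat) : Nat := min (c - 1).toNat (2 ^ n - 1)

-- one step of A's reverse walk, with lengths[i] = 2^i substituted
def pvStepA (ops : List Int) (p : Int × Int) (i : Int) : Int × Int :=
  if (2 : Int) ^ i.toNat < p.1 then
    (p.1 - 2 ^ i.toNat, if ops.getD i.toNat 0 = 1 then pvIter p.2 else p.2)
  else p

theorem pvSetAppend {a : Type} (l1 l2 : List a) (n : Nat) (h : n = l1.length) (v : a) :
    (l1 ++ l2).set n v = l1 ++ l2.set 0 v := by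
  subst h
  induction l1 with
  | nil => rfl
  | cons x l ih => simp [List.cons_append, List.length_cons]

theorem pvGetDAppend {a : Type} (l1 l2 : List a) (n : Nat) (d : a) (h : n < l1.length) :
    (l1 ++ l2).getD n d = l1.getD n d := by
  induction l1 generalizing n with
  | nil => simp at h
  | cons x l ih =>
      cases n with
      | zero => rfl
      | succ n => simpa using ih n (by simpa using h)

theorem pvLengths_aux (m : Nat) : ∀ j, j ≤ m →
    (List.range j).foldl (fun ls i => ls.set (i + 1) (ls.getD i 0 * 2)) (List.replicate (m + 1) (1 : Int))
      = (List.range (j + 1)).map (fun i => (2 : Int) ^ i) ++ List.replicate (m - j) (1 : Int) := by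
  intro j
  induction j with
  | zero => intro _; simp [List.range_one, List.replicate_succ]
  | succ j ih =>
      intro hj
      rw [List.range_succ, List.foldl_append, ih (by omega)]
      simp only [List.foldl_cons, List.foldl_nil]
      have hget : (((List.range (j + 1)).map (fun i => (2 : Int) ^ i)) ++ List.replicate (m - j) (1 : Int)).getD j 0 = (2 : Int) ^ j := by
        rw [pvGetDAppend _ _ _ _ (by simp)]
        rw [List.getD_eq_getElem _ _ (by simp)]
        simp
      rw [hget]
      have hrep : List.replicate (m - j) (1 : Int) = 1 :: List.replicate (m - (j + 1)) 1 := by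
        have h1 : m - j = (m - (j + 1)) + 1 := by omega
        rw [h1, List.replicate_succ]
      rw [hrep, pvSetAppend _ _ _ (by simp) _, List.set_cons_zero]
      rw [List.range_succ (n := j + 1), List.map_append]
      simp [pow_succ, List.append_assoc]

theorem pvLengths_eq (m : Nat) :
    (List.range m).foldl (fun ls i => ls.set (i + 1) (ls.getD i 0 * 2)) (List.replicate (m + 1) (1 : Int))
      = (List.range (m + 1)).map (fun i => (2 : Int) ^ i) := by
  simpa using pvLengths_aux m m le_rfl

theorem pvRevFold_snd (ops : List Int) :
    ∀ n, n ≤ ops.length → ∀ c s : Int,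
      ((List.range n).foldl (fun p (j : Nat) => pvStepA ops p ((n : Int) - 1 - (j : Int))) (c, s)).2
        = pvIter^[pvBsum (ops.take n) (pvT c n)] s := by
  intro n
  induction n with
  | zero => intro _ c s; simp [pvBsum]
  | succ n ih =>
      intro hn c s
      rw [List.range_succ_eq_map]
      simp only [List.foldl_cons, List.foldl_map]
      have hfun : (fun (p : Int × Int) (j : Nat) => pvStepA ops p (((n + 1 : Nat) : Int) - 1 - ((Nat.succ j : Nat) : Int)))
          = fun (p : Int × Int) (j : Nat) => pvStepA ops p ((n : Int) - 1 - (j : Int)) := by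
        funext p j
        congr 1
        push_cast
        ring
      have hcast : ((2 ^ n : Nat) : Int) = (2 : Int) ^ n := by push_cast; ring
      have hpow : 0 < 2 ^ n := Nat.two_pow_pos n
      have hn' : n < ops.length := by omega
      have hlen : (ops.take n).length = n := by simp [List.length_take]; omega
      have htake : ops.take (n + 1) = ops.take n ++ [ops[n]] := by
        rw [List.take_add_one, List.getElem?_eq_getElem hn']
        rfl
      by_cases hc : (2 : Int) ^ n < c
      · have hstep : pvStepA ops (c, s) (((n + 1 : Nat) : Int) - 1 - ((0 : Nat) : Int))
            = (c - 2 ^ n, if ops.getD n 0 = 1 then pvIter s else s) := by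
          have hi : (((n + 1 : Nat) : Int) - 1 - ((0 : Nat) : Int)) = (n : Int) := by push_cast; ring
          rw [hi]
          unfold pvStepA
          simp [hc]
        rw [hstep, hfun, ih (by omega)]
        have hr : pvT (c - 2 ^ n) n ≤ 2 ^ n - 1 := Nat.min_le_right _ _
        have hT : pvT c (n + 1) = 2 ^ n + pvT (c - 2 ^ n) n := by
          unfold pvT
          rw [pow_succ]
          rw [← hcast] at hc
          rw [← hcast]
          rw [Nat.min_def, Nat.min_def]
          split_ifs <;> omega
        have hcnt : pvBsum (ops.take (n + 1)) (pvT c (n + 1))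
            = pvBsum (ops.take n) (pvT (c - 2 ^ n) n) + (if ops.getD n 0 = 1 then 1 else 0) := by
          rw [htake, pvBsum_append, hlen, hT]
          have hdiv : (2 ^ n + pvT (c - 2 ^ n) n) / 2 ^ n % 2 = 1 := by
            rw [Nat.add_comm, Nat.add_div_right _ hpow, Nat.div_eq_of_lt (by omega)]
          rw [hdiv]
          have hdrop := pvBsum_pow_add (ops.take n) 1 (pvT (c - 2 ^ n) n)
          rw [hlen, mul_one] at hdrop
          rw [hdrop]
          have hgd : ops.getD n 0 = ops[n] := List.getD_eq_getElem _ _ hn'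
          rw [hgd]
          simp
        rw [hcnt]
        by_cases hop : ops.getD n 0 = 1
        · rw [if_pos hop, if_pos hop, Function.iterate_succ_apply]
        · rw [if_neg hop, if_neg hop]
          simp
      · have hstep : pvStepA ops (c, s) (((n + 1 : Nat) : Int) - 1 - ((0 : Nat) : Int)) = (c, s) := by
          have hi : (((n + 1 : Nat) : Int) - 1 - ((0 : Nat) : Int)) = (n : Int) := by push_cast; ring
          rw [hi]
          unfold pvStepA
          simp [hc]
        rw [hstep, hfun, ih (by omega)]
        have hTlt : pvT c n < 2 ^ n := by
          have := Nat.min_le_right (c - 1).toNat (2 ^ n - 1)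
          unfold pvT
          omega
        have hTeq : pvT c (n + 1) = pvT c n := by
          unfold pvT
          rw [pow_succ]
          rw [← hcast] at hc
          rw [Nat.min_def, Nat.min_def]
          split_ifs <;> omega
        have hcnt : pvBsum (ops.take (n + 1)) (pvT c (n + 1)) = pvBsum (ops.take n) (pvT c n) := by
          rw [htake, pvBsum_append, hlen, hTeq, Nat.div_eq_of_lt hTlt]
          simp
        rw [hcnt]

theorem pvA_eq (k : Int) (ops : List Int) :
    kthCharacter k ops
      = String.singleton (Char.ofNat ((97 + ((pvBsum ops (pvT k ops.length) : Int) % 26)).toNat)) := by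
  simp only [kthCharacter]
  rw [pvLengths_eq]
  have hr : PySem.List.pyRange ((ops.length : Int) - 1) (-1) (-1)
      = (List.range ops.length).map (fun j : Nat => ((ops.length : Int) - 1 - (j : Int))) := by
    rw [PySem.List.pyRange_neg_one]
    have h2 : (((ops.length : Int) - 1) - (-1)).toNat = ops.length := by omega
    rw [h2]
  rw [hr, List.foldl_map]
  have hcong :
      List.foldl
        (fun (x : Int × Int) (y : Nat) =>
          if PySem.List.pyGetD ((List.range (ops.length + 1)).map (fun i => (2 : Int) ^ i)) ((ops.length : Int) - 1 - (y : Int)) 0 < x.1 then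
            (x.1 - PySem.List.pyGetD ((List.range (ops.length + 1)).map (fun i => (2 : Int) ^ i)) ((ops.length : Int) - 1 - (y : Int)) 0,
             if PySem.List.pyGetD ops ((ops.length : Int) - 1 - (y : Int)) 0 = 1 then PySem.Int.mod (x.2 + 1) 26 else x.2)
          else x)
        ((k, 0) : Int × Int) (List.range ops.length)
      = List.foldl (fun (p : Int × Int) (j : Nat) => pvStepA ops p ((ops.length : Int) - 1 - (j : Int)))
        ((k, 0) : Int × Int) (List.range ops.length) := by
    refine PySem.List.foldl_congr_mem _ _ _ _ ?_
    intro p j hj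
    rw [List.mem_range] at hj
    have hi0 : (0 : Int) ≤ (ops.length : Int) - 1 - (j : Int) := by omega
    have hidx : ((ops.length : Int) - 1 - (j : Int)) = ((ops.length - 1 - j : Nat) : Int) := by omega
    have e1 : PySem.List.pyGetD ((List.range (ops.length + 1)).map (fun i => (2 : Int) ^ i)) ((ops.length : Int) - 1 - (j : Int)) 0
        = (2 : Int) ^ ((ops.length : Int) - 1 - (j : Int)).toNat := by
      rw [hidx, PySem.List.pyGetD_natCast, Int.toNat_natCast,
          List.getD_eq_getElem _ _ (by simp; omega)]
      simp
    have e2 : PySem.List.pyGetD ops ((ops.length : Int) - 1 - (j : Int)) 0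
        = ops.getD ((ops.length : Int) - 1 - (j : Int)).toNat 0 := by
      rw [hidx, PySem.List.pyGetD_natCast, Int.toNat_natCast]
    rw [e1, e2]
    unfold pvStepA pvIter
    try rw [PySem.Int.mod_eq_emod_of_pos (by norm_num : (0:Int) < 26)]
  rw [hcong]
  rw [pvRevFold_snd ops ops.length le_rfl k 0, List.take_length, pvIter_zero]
  have hfin : PySem.Int.mod (97 - 97 + ((pvBsum ops (pvT k ops.length) : Int) % 26)) 26 + 97
      = 97 + (pvBsum ops (pvT k ops.length) : Int) % 26 := by
    rw [PySem.Int.mod_eq_emod_of_pos (by norm_num)]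
    omega
  rw [hfin]


theorem pvBsum_zero (l : List Int) : pvBsum l 0 = 0 := by
  induction l with
  | nil => rfl
  | cons op rest ih => simp [pvBsum, ih]

theorem pvBsum_take (l : List Int) : ∀ (b t : Nat), t < 2 ^ b →
    pvBsum (l.take b) t = pvBsum l t := by
  induction l with
  | nil => intro b t _; simp
  | cons op rest ih =>
      intro b t ht
      cases b with
      | zero =>
          have ht0 : t = 0 := by simpa using ht
          subst ht0
          simp [pvBsum_zero]
      | succ b =>
          rw [List.take_succ_cons, pvBsum, pvBsum]
          have hd : t / 2 < 2 ^ b := by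
            rw [pow_succ] at ht
            omega
          rw [ih b (t / 2) hd]

theorem pvWalk_append (k : Int) (l : List Int) (op : Int) :
    pvWalk k (l ++ [op]) =
      (if k ≤ (2 : Int) ^ l.length then pvWalk k l
       else
         let c := pvWalk (k - (2 : Int) ^ l.length) l
         if op ≠ 1 then c
         else if c = "z" then "a" else String.singleton (Char.ofNat ((c.get 0).toNat + 1))) := by
  rw [pvWalk]
  simp

theorem pvWalk_eq (ops : List Int) : ∀ k : Int,
    pvWalk k ops = String.singleton (Char.ofNat (97 + pvBsum ops (pvT k ops.length) % 26)) := by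
  induction ops using List.reverseRecOn with
  | nil =>
      intro k
      rw [pvWalk, dif_pos rfl]
      simp only [pvBsum]
      decide
  | append_singleton l op ih =>
      intro k
      rw [pvWalk_append]
      have hcast : ((2 ^ l.length : Nat) : Int) = (2 : Int) ^ l.length := by push_cast; ring
      have hpow : 0 < 2 ^ l.length := Nat.two_pow_pos l.length
      have hlen : (l ++ [op]).length = l.length + 1 := by simp
      by_cases hk : k ≤ (2 : Int) ^ l.length
      · rw [if_pos hk, ih k]
        have hk' : k ≤ ((2 ^ l.length : Nat) : Int) := by rw [hcast]; exact hk
        have hTlt : pvT k l.length < 2 ^ l.length := by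
          have := Nat.min_le_right (k - 1).toNat (2 ^ l.length - 1)
          unfold pvT
          omega
        have hTeq : pvT k ((l ++ [op]).length) = pvT k l.length := by
          rw [hlen]
          unfold pvT
          rw [pow_succ]
          rw [Nat.min_def, Nat.min_def]
          split_ifs <;> omega
        rw [hTeq, pvBsum_append, Nat.div_eq_of_lt hTlt]
        simp
      · rw [if_neg hk]
        have hc : (2 : Int) ^ l.length < k := by omega
        have hc' : ((2 ^ l.length : Nat) : Int) < k := by rw [hcast]; exact hc
        rw [ih (k - (2 : Int) ^ l.length)]
        have hr : pvT (k - 2 ^ l.length) l.length ≤ 2 ^ l.length - 1 := Nat.min_le_right _ _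
        have hT : pvT k ((l ++ [op]).length) = 2 ^ l.length + pvT (k - 2 ^ l.length) l.length := by
          rw [hlen]
          unfold pvT
          rw [pow_succ, ← hcast]
          rw [Nat.min_def, Nat.min_def]
          split_ifs <;> omega
        have hcnt : pvBsum (l ++ [op]) (pvT k ((l ++ [op]).length))
            = pvBsum l (pvT (k - 2 ^ l.length) l.length) + (if op = 1 then 1 else 0) := by
          rw [hT, pvBsum_append]
          have hdiv : (2 ^ l.length + pvT (k - 2 ^ l.length) l.length) / 2 ^ l.length % 2 = 1 := by
            rw [Nat.add_comm, Nat.add_div_right _ hpow, Nat.div_eq_of_lt (by omega)]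
          rw [hdiv]
          have hdrop := pvBsum_pow_add l 1 (pvT (k - 2 ^ l.length) l.length)
          rw [mul_one] at hdrop
          rw [hdrop]
          simp
        rw [hcnt]
        by_cases hop : op = 1
        · rw [if_neg (by simp [hop]), if_pos hop]
          set s := pvBsum l (pvT (k - 2 ^ l.length) l.length) with hs
          have hrlt : s % 26 < 26 := Nat.mod_lt _ (by norm_num)
          have h1 : (s + 1) % 26 = (s % 26 + 1) % 26 := by omega
          rw [h1]
          set r := s % 26 with hrdef
          interval_cases r <;> decide
        · rw [if_pos hop, if_neg hop]
          simp

-- ===== VERDICT (by name: the statement is the Claim_ definition above) =====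
theorem kthCharacter_spec : Claim_equal_kthCharacter := by
  unfold Claim_equal_kthCharacter Spec_kthCharacter
  intro k ops _
  rw [pvA_eq]
  have hA : ∀ s : Nat, ((97 + ((s : Int) % 26)).toNat) = 97 + s % 26 := by
    intro s; omega
  rw [hA]
  unfold kthCharacter_alt
  by_cases hk : k ≤ 1
  · rw [if_pos hk]
    have hT : pvT k ops.length = 0 := by
      unfold pvT
      have : (k - 1).toNat = 0 := by omega
      rw [this]
      simp
    rw [hT, pvBsum_zero]
    decide
  · rw [if_neg hk, pvWalk_eq]
    congr 2
    set b := PySem.Int.bitLength (k - 1) with hb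
    have hlt : (k - 1).toNat < 2 ^ b := by
      have h1 := PySem.Int.lt_two_pow_bitLength (k - 1)
      rw [← hb] at h1
      omega
    by_cases hmb : ops.length ≤ b
    · rw [List.take_of_length_le hmb]
    · have hlen : (ops.take b).length = b := by simp; omega
      have hmono : (2 : Nat) ^ b ≤ 2 ^ ops.length := Nat.pow_le_pow_right (by norm_num) (by omega)
      have hTT : pvT k b = pvT k ops.length := by
        unfold pvT
        rw [Nat.min_def, Nat.min_def]
        split_ifs <;> omega
      rw [hlen, hTT, pvBsum_take ops b (pvT k ops.length) (by unfold pvT; rw [Nat.min_def]; split_ifs <;> omega)]
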